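-- pv_equiv track=rewrite | github.com/CarpMarcel02/Python | Exercitiu9.py | spectation
-- ===== SOURCE A (Python) =====
-- def spectation(matrice):
--     result = set()
--     for i in range(1, len(matrice)):
--         for j in range(len(matrice[i])):
--             for k in range(i):
--                 if matrice[i][j] <= matrice[k][j]:
--                     result.add((i, j))
--     return result
-- ===== SOURCE B (Python) =====
-- def spectation(matrice):
--     result = set()
--     if not matrice:
--         return result
--     maxes = list(matrice[0])
--     for i in range(1, len(matrice)):
--         row = matrice[i]
--         for j in range(len(row)):
--             if row[j] <= maxes[j]:
--                 result.add((i, j))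
--             else:
--                 maxes[j] = row[j]
--     return result
-- ===== Notes on version B (the rewrite author's own statement) =====
-- stated objective: faster
-- what changed: Replaces the scan over all earlier rows for every cell (triple loop) by a running per-column maximum of the rows seen so far, so each cell is compared once against that maximum in a single pass.
import Mathlib
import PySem

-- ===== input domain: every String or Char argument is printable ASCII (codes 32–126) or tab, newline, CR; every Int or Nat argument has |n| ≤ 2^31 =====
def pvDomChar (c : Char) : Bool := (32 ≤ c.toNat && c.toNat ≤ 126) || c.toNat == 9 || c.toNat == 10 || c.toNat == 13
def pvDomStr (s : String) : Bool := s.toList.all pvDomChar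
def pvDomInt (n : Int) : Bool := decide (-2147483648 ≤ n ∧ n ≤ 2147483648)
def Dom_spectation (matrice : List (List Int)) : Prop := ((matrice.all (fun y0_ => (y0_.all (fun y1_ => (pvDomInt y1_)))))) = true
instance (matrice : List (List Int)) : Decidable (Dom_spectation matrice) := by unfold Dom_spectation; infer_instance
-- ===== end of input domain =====

-- B replaces A's rescan of all earlier rows for every cell by a running per-column maximum, one pass over the rows (objective: faster).

-- ===== PORT A =====
-- helper: the body of A's outer loop (the j- and k-loops for row index i)
def stepA (m : List (List Int)) (result : List (Int × Int)) (i : Int) : List (Int × Int) :=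
  (PySem.List.pyRange 0 ((PySem.List.pyGetD m i []).length : Int) 1).foldl (fun result j =>
    (PySem.List.pyRange 0 i 1).foldl (fun result k =>
      if PySem.List.pyGetD (PySem.List.pyGetD m i []) j 0 ≤ PySem.List.pyGetD (PySem.List.pyGetD m k []) j 0
      then PySem.Set.add result (i, j) else result) result) result

def spectation (matrice : List (List Int)) : List (Int × Int) :=
  (PySem.List.pyRange 1 (matrice.length : Int) 1).foldl (stepA matrice) PySem.Set.empty

-- ===== PORT B =====
-- helper: the body of B's outer loop; state = (result, maxes)
def stepB (m : List (List Int)) (st : List (Int × Int) × List Int) (i : Int) : List (Int × Int) × List Int :=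
  let row := PySem.List.pyGetD m i []
  (PySem.List.pyRange 0 (row.length : Int) 1).foldl (fun st j =>
    if PySem.List.pyGetD row j 0 ≤ PySem.List.pyGetD st.2 j 0
    then (PySem.Set.add st.1 (i, j), st.2)
    else (st.1, PySem.List.pySetD st.2 j (PySem.List.pyGetD row j 0))) st

def spectation_alt (matrice : List (List Int)) : List (Int × Int) :=
  match matrice with
  | [] => PySem.Set.empty
  | first :: _ =>
    ((PySem.List.pyRange 1 (matrice.length : Int) 1).foldl (stepB matrice)
      (PySem.Set.empty, first)).1

-- ===== PRECONDITION & SPEC =====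
-- Pre_ excludes exactly the ragged matrices on which A raises IndexError (a later row longer
-- than some earlier row makes A read matrice[k][j] past the end of row k): row lengths must be nonincreasing.
def Pre_spectation (matrice : List (List Int)) : Prop :=
  List.IsChain (fun a b => b ≤ a) (matrice.map (fun r => r.length))
instance (matrice : List (List Int)) : Decidable (Pre_spectation matrice) := by
  unfold Pre_spectation; infer_instance

def pvWitness_spectation : List (List Int) := [[1, 2, 5], [3, 0], [2, 5]]

def Spec_spectation (matrice : List (List Int)) (out : List (Int × Int)) : Prop := out = spectation_alt matrice
instance (matrice : List (List Int)) (out : List (Int × Int)) : Decidable (Spec_spectation matrice out) := by unfold Spec_spectation; infer_instance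

-- ===== CLAIM (what is proved, stated in full; the proofs are below) =====
def Claim_equal_spectation : Prop := ∀ (matrice : List (List Int)), Dom_spectation matrice → Pre_spectation matrice → Spec_spectation matrice (spectation matrice)

-- ===== LEMMAS AND PROOFS =====

-- row k of the matrix (Nat index, total)
def rowL (m : List (List Int)) (k : Nat) : List Int := m.getD k []

-- running column maximum of rows 0..t-1 at column j (initialised at row 0)
def colmax (m : List (List Int)) (t j : Nat) : Int :=
  ((List.range t).map (fun k => (rowL m k).getD j 0)).foldl max ((rowL m 0).getD j 0)

-- the body of B's inner loop, named for the loop lemmas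
def innerB (row : List Int) (i : Int) (st : List (Int × Int) × List Int) (j : Int) :
    List (Int × Int) × List Int :=
  if PySem.List.pyGetD row j 0 ≤ PySem.List.pyGetD st.2 j 0
  then (PySem.Set.add st.1 (i, j), st.2)
  else (st.1, PySem.List.pySetD st.2 j (PySem.List.pyGetD row j 0))

-- the two outer loops stopped after processing rows 1..t-1
def FA (m : List (List Int)) (t : Nat) : List (Int × Int) :=
  (PySem.List.pyRange 1 (t : Int) 1).foldl (stepA m) PySem.Set.empty
def FB (m : List (List Int)) (t : Nat) : List (Int × Int) × List Int :=
  (PySem.List.pyRange 1 (t : Int) 1).foldl (stepB m) (PySem.Set.empty, rowL m 0)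

lemma pyGetD_nonneg {α : Type} [Inhabited α] (xs : List α) (i : Int) (h : 0 ≤ i) (d : α) :
    PySem.List.pyGetD xs i d = xs.getD i.toNat d := by
  rw [show i = ((i.toNat : Nat) : Int) from (Int.toNat_of_nonneg h).symm,
    PySem.List.pyGetD_natCast]
  simp
  rw [max_eq_left h]

lemma length_pySetD {α : Type} (xs : List α) (i : Int) (v : α) :
    (PySem.List.pySetD xs i v).length = xs.length := by
  simp only [PySem.List.pySetD, PySem.List.pySet?]
  cases PySem.List.pyIdx? xs.length i <;> simp

lemma pyGetD_pySetD_ne (M : List Int) (j p v : Int) (hj : 0 ≤ j) (hp : 0 ≤ p) (hne : j ≠ p) :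
    PySem.List.pyGetD (PySem.List.pySetD M j v) p 0 = PySem.List.pyGetD M p 0 := by
  rw [PySem.List.pySetD_of_nonneg M v hj, pyGetD_nonneg _ _ hp, pyGetD_nonneg _ _ hp]
  simp [List.getD, List.getElem?_set_ne (show j.toNat ≠ p.toNat by omega)]

lemma pyGetD_pySetD_self (M : List Int) (j v : Int) (hj : 0 ≤ j) (hlen : j.toNat < M.length) :
    PySem.List.pyGetD (PySem.List.pySetD M j v) j 0 = v := by
  rw [PySem.List.pySetD_of_nonneg M v hj, pyGetD_nonneg _ _ hj]
  simp [List.getD, hlen]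

lemma pre_len (m : List (List Int)) (hpre : Pre_spectation m) (a b : Nat) (hab : a ≤ b)
    (hb : b < m.length) : (rowL m b).length ≤ (rowL m a).length := by
  rcases Nat.eq_or_lt_of_le hab with rfl | h
  · exact le_refl _
  · have ha : a < m.length := lt_trans h hb
    have hp : (m.map (fun r => r.length)).Pairwise (fun x y => y ≤ x) :=
      List.IsChain.pairwise hpre
    have hgl := (List.pairwise_iff_getElem.1 hp) a b (by simpa using ha) (by simpa using hb) h
    simp only [List.getElem_map] at hgl
    simpa [rowL, List.getD, List.getElem?_eq_getElem, ha, hb] using hgl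

lemma foldl_set_add_ite (l : List Int) (p : Int → Prop) [DecidablePred p] (x : Int × Int)
    (s : List (Int × Int)) :
    l.foldl (fun r k => if p k then PySem.Set.add r x else r) s
      = if ∃ k ∈ l, p k then PySem.Set.add s x else s := by
  have hadd : ∀ s : List (Int × Int), PySem.Set.add (PySem.Set.add s x) x = PySem.Set.add s x :=
    fun s => PySem.Set.add_of_mem ((PySem.Set.mem_add _ _ _).2 (Or.inr rfl))
  induction l generalizing s with
  | nil => simp
  | cons k l ih =>
    simp only [List.foldl_cons]
    by_cases hk : p k
    · rw [if_pos hk, ih, hadd]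
      have hex : ∃ y ∈ k :: l, p y := ⟨k, by simp, hk⟩
      rw [if_pos hex]
      split <;> rfl
    · rw [if_neg hk, ih]
      by_cases h : ∃ y ∈ l, p y
      · rw [if_pos h, if_pos (by rcases h with ⟨y, hy, hp⟩; exact ⟨y, List.mem_cons_of_mem _ hy, hp⟩)]
      · rw [if_neg h, if_neg (by rintro ⟨y, hy, hp⟩; rcases List.mem_cons.1 hy with rfl | hy; exact hk hp; exact h ⟨y, hy, hp⟩)]

lemma le_colmax_iff (m : List (List Int)) (t j : Nat) (ht : 1 ≤ t) (x : Int) :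
    x ≤ colmax m t j ↔ ∃ k : Nat, k < t ∧ x ≤ (rowL m k).getD j 0 := by
  simp only [colmax]
  constructor
  · intro hx
    rcases PySem.List.foldl_max_mem ((List.range t).map (fun k => (rowL m k).getD j 0)) ((rowL m 0).getD j 0) with h | h
    · rw [h] at hx; exact ⟨0, ht, hx⟩
    · rcases List.mem_map.1 h with ⟨k, hk, hkv⟩
      rw [← hkv] at hx
      exact ⟨k, List.mem_range.1 hk, hx⟩
  · rintro ⟨k, hk, hx⟩
    exact hx.trans ((PySem.List.le_foldl_max _ _).2 _ (List.mem_map.2 ⟨k, List.mem_range.2 hk, rfl⟩))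

lemma colmax_succ (m : List (List Int)) (t j : Nat) :
    colmax m (t + 1) j = max (colmax m t j) ((rowL m t).getD j 0) := by
  simp [colmax, List.range_succ]

lemma B0 (row : List Int) (i : Int) (js : List Int) (st : List (Int × Int) × List Int) :
    ((js.foldl (innerB row i) st).2).length = st.2.length := by
  induction js generalizing st with
  | nil => rfl
  | cons j js ih =>
    simp only [List.foldl_cons, ih, innerB]
    split <;> simp

lemma B1 (row : List Int) (i : Int) (js : List Int) (res : List (Int × Int)) (M M0 : List Int)
    (hnd : js.Nodup) (hpos : ∀ j ∈ js, 0 ≤ j)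
    (hag : ∀ j ∈ js, PySem.List.pyGetD M j 0 = PySem.List.pyGetD M0 j 0) :
    (js.foldl (innerB row i) (res, M)).1
      = js.foldl (fun r j => if PySem.List.pyGetD row j 0 ≤ PySem.List.pyGetD M0 j 0
          then PySem.Set.add r (i, j) else r) res := by
  induction js generalizing res M with
  | nil => rfl
  | cons j js ih =>
    simp only [List.foldl_cons, innerB]
    have hj0 : (0:Int) ≤ j := hpos j (by simp)
    have hagj := hag j (by simp)
    by_cases hc : PySem.List.pyGetD row j 0 ≤ PySem.List.pyGetD M j 0
    · rw [if_pos hc, if_pos (hagj ▸ hc)]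
      exact ih _ _ (List.nodup_cons.1 hnd).2 (fun x hx => hpos x (by simp [hx]))
        (fun x hx => hag x (by simp [hx]))
    · rw [if_neg hc, if_neg (hagj ▸ hc)]
      refine ih _ _ (List.nodup_cons.1 hnd).2 (fun x hx => hpos x (by simp [hx])) ?_
      intro x hx
      rw [pyGetD_pySetD_ne _ _ _ _ hj0 (hpos x (by simp [hx]))
        (fun he => (List.nodup_cons.1 hnd).1 (he ▸ hx))]
      exact hag x (by simp [hx])

lemma B2 (row : List Int) (i : Int) (js : List Int) (res : List (Int × Int)) (M M0 : List Int)
    (hnd : js.Nodup) (hpos : ∀ j ∈ js, 0 ≤ j) (hlen : ∀ j ∈ js, j.toNat < M.length)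
    (hag : ∀ j ∈ js, PySem.List.pyGetD M j 0 = PySem.List.pyGetD M0 j 0)
    (p : Int) (hp : 0 ≤ p) :
    PySem.List.pyGetD (js.foldl (innerB row i) (res, M)).2 p 0
      = if p ∈ js then max (PySem.List.pyGetD M0 p 0) (PySem.List.pyGetD row p 0)
        else PySem.List.pyGetD M p 0 := by
  induction js generalizing res M with
  | nil => rfl
  | cons j js ih =>
    have hj0 : (0:Int) ≤ j := hpos j (by simp)
    have hagj := hag j (by simp)
    have hnd' := (List.nodup_cons.1 hnd).2
    have hjn : j ∉ js := (List.nodup_cons.1 hnd).1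
    simp only [List.foldl_cons, innerB]
    by_cases hc : PySem.List.pyGetD row j 0 ≤ PySem.List.pyGetD M j 0
    · rw [if_pos hc]
      rw [ih _ _ hnd' (fun x hx => hpos x (by simp [hx])) (fun x hx => hlen x (by simp [hx]))
        (fun x hx => hag x (by simp [hx]))]
      by_cases hpj : p = j
      · subst hpj
        rw [if_neg hjn, if_pos (by simp), ← hagj, max_eq_left (hagj ▸ hc)]
      · by_cases hpm : p ∈ js
        · rw [if_pos hpm, if_pos (by simp [hpm])]
        · rw [if_neg hpm, if_neg (by simp [hpj, hpm])]
    · rw [if_neg hc]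
      have hjlen : j.toNat < M.length := hlen j (by simp)
      have hag' : ∀ x ∈ js, PySem.List.pyGetD (PySem.List.pySetD M j (PySem.List.pyGetD row j 0)) x 0 = PySem.List.pyGetD M0 x 0 := by
        intro x hx
        rw [pyGetD_pySetD_ne _ _ _ _ hj0 (hpos x (by simp [hx])) (fun he => hjn (he ▸ hx))]
        exact hag x (by simp [hx])
      have hlen' : ∀ x ∈ js, x.toNat < (PySem.List.pySetD M j (PySem.List.pyGetD row j 0)).length := by
        intro x hx
        rw [length_pySetD]
        exact hlen x (by simp [hx])
      rw [ih _ _ hnd' (fun x hx => hpos x (by simp [hx])) hlen' hag']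
      by_cases hpj : p = j
      · subst hpj
        rw [if_neg hjn, if_pos (by simp), pyGetD_pySetD_self _ _ _ hj0 hjlen,
          max_eq_right (le_of_lt (by rw [← hagj]; exact lt_of_not_ge hc))]
      · by_cases hpm : p ∈ js
        · rw [if_pos hpm, if_pos (by simp [hpm])]
        · rw [if_neg hpm, if_neg (by simp [hpj, hpm]),
            pyGetD_pySetD_ne _ _ _ _ hj0 hp (fun he => hpj he.symm)]

lemma mainInv (m : List (List Int)) (hpre : Pre_spectation m) :
    ∀ (t : Nat), 1 ≤ t → t ≤ m.length →
      (FB m t).1 = FA m t ∧ ((FB m t).2).length = (rowL m 0).length ∧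
      (∀ j : Nat, j < (rowL m (t - 1)).length → ((FB m t).2).getD j 0 = colmax m t j) := by
  intro t ht
  induction t, ht using Nat.le_induction with
  | base =>
    intro _
    have hnil : PySem.List.pyRange 1 ((1:Nat) : Int) 1 = [] :=
      PySem.List.pyRange_one_eq_nil (by norm_num)
    refine ⟨?_, ?_, ?_⟩
    · simp [FA, FB]
    · simp [FB]
    · intro j hj
      simp [FB, colmax, List.range_one]
  | succ t ht ih =>
    intro hle
    have htlt : t < m.length := hle
    obtain ⟨ihr, ihlen, ihinv⟩ := ih (Nat.le_of_succ_le hle)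
    have hcast : (((t+1:Nat)) : Int) = (t : Int) + 1 := by push_cast; ring
    have hsplit : PySem.List.pyRange 1 ((t : Int) + 1) 1
        = PySem.List.pyRange 1 (t : Int) 1 ++ [(t : Int)] :=
      PySem.List.pyRange_one_succ_right (by exact_mod_cast ht)
    have hFA : FA m (t+1) = stepA m (FA m t) (t : Int) := by
      rw [FA, hcast, hsplit, List.foldl_append, List.foldl_cons, List.foldl_nil]; rfl
    have hFB : FB m (t+1) = stepB m (FB m t) (t : Int) := by
      rw [FB, hcast, hsplit, List.foldl_append, List.foldl_cons, List.foldl_nil]; rfl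
    have hrow : PySem.List.pyGetD m ((t:Nat) : Int) [] = rowL m t := by
      rw [PySem.List.pyGetD_natCast]; rfl
    set row := rowL m t with hrowdef
    set js := PySem.List.pyRange 0 (row.length : Int) 1 with hjs
    set M := (FB m t).2 with hM
    have hnd : js.Nodup := PySem.List.nodup_pyRange_one _ _
    have hpos : ∀ j ∈ js, 0 ≤ j := fun j hj => ((PySem.List.mem_pyRange_one).1 hj).1
    have hjlt : ∀ j ∈ js, j < (row.length : Int) := fun j hj => ((PySem.List.mem_pyRange_one).1 hj).2
    have hrowle : row.length ≤ (rowL m (t-1)).length :=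
      pre_len m hpre (t-1) t (Nat.sub_le t 1) htlt
    have hrow0 : row.length ≤ (rowL m 0).length := pre_len m hpre 0 t (Nat.zero_le t) htlt
    have hlenM : ∀ j ∈ js, j.toNat < M.length := by
      intro j hj
      rw [ihlen]
      have h1 := hjlt j hj
      have h2 := hpos j hj
      omega
    -- the condition equivalence
    have hcond : ∀ j ∈ js,
        ((∃ k ∈ PySem.List.pyRange 0 (t : Int) 1,
            PySem.List.pyGetD row j 0 ≤ PySem.List.pyGetD (PySem.List.pyGetD m k []) j 0)
          ↔ PySem.List.pyGetD row j 0 ≤ PySem.List.pyGetD M j 0) := by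
      intro j hj
      have hj0 := hpos j hj
      have hjr : j.toNat < row.length := by have := hjlt j hj; omega
      have hMj : PySem.List.pyGetD M j 0 = colmax m t j.toNat := by
        rw [pyGetD_nonneg _ _ hj0]
        exact ihinv j.toNat (lt_of_lt_of_le hjr hrowle)
      rw [hMj, le_colmax_iff m t j.toNat ht]
      constructor
      · rintro ⟨k, hk, hkle⟩
        have hk' := (PySem.List.mem_pyRange_one).1 hk
        refine ⟨k.toNat, by omega, ?_⟩
        rw [← pyGetD_nonneg (rowL m k.toNat) j hj0,
          show rowL m k.toNat = PySem.List.pyGetD m k [] from by rw [pyGetD_nonneg m k hk'.1]; rfl]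
        exact hkle
      · rintro ⟨k, hk, hkle⟩
        refine ⟨(k : Int), (PySem.List.mem_pyRange_one).2 ⟨by positivity, by exact_mod_cast hk⟩, ?_⟩
        rw [PySem.List.pyGetD_natCast,
          show PySem.List.pyGetD (m.getD k []) j 0 = (rowL m k).getD j.toNat 0 from by
            rw [pyGetD_nonneg _ j hj0]; rfl]
        exact hkle
    -- stepB unfolds to the innerB fold
    have hstepB : stepB m (FB m t) (t : Int) = js.foldl (innerB row (t : Int)) ((FB m t).1, M) := by
      simp only [stepB, hrow, hjs, hM]
      rfl
    -- A's step collapses: the k-scan is an existence test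
    have hstepA : stepA m (FA m t) (t : Int)
        = js.foldl (fun r j => if ∃ k ∈ PySem.List.pyRange 0 (t : Int) 1,
              PySem.List.pyGetD row j 0 ≤ PySem.List.pyGetD (PySem.List.pyGetD m k []) j 0
            then PySem.Set.add r ((t : Int), j) else r) (FA m t) := by
      simp only [stepA, hrow, hjs]
      apply PySem.List.foldl_congr_mem
      intro acc j _
      exact foldl_set_add_ite _ _ _ _
    refine ⟨?_, ?_, ?_⟩
    · rw [hFB, hFA, hstepB, hstepA]
      rw [B1 row (t : Int) js (FB m t).1 M M hnd hpos (fun _ _ => rfl), ihr]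
      apply PySem.List.foldl_congr_mem
      intro acc j hj
      exact if_congr (Iff.symm (hcond j hj)) rfl rfl
    · rw [hFB, hstepB]
      have := B0 row (t : Int) js ((FB m t).1, M)
      rw [this]
      exact ihlen
    · intro p hp
      have hp' : p < row.length := by simpa using hp
      rw [hFB, hstepB]
      have hmem : ((p : Nat) : Int) ∈ js := by
        refine (PySem.List.mem_pyRange_one).2 ⟨by positivity, by exact_mod_cast hp'⟩
      have hp'' : p < row.length := by rw [hrowdef]; simpa using hp
      have hB2 := B2 row (t : Int) js (FB m t).1 M M hnd hpos hlenM (fun _ _ => rfl)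
        ((p : Nat) : Int) (by positivity)
      rw [if_pos hmem] at hB2
      simp only [PySem.List.pyGetD_natCast] at hB2
      rw [hB2, colmax_succ, ihinv p (lt_of_lt_of_le hp'' hrowle)]

-- ===== VERDICT (by name: the statement is the Claim_ definition above) =====
theorem spectation_spec : Claim_equal_spectation := by
  intro matrice hdom hpre
  unfold Spec_spectation
  cases matrice with
  | nil => rfl
  | cons first rest =>
    obtain ⟨h1, _, _⟩ := mainInv (first :: rest) hpre (first :: rest).length (by simp) (le_refl _)
    have hA : spectation (first :: rest) = FA (first :: rest) (first :: rest).length := rfl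
    have hB : spectation_alt (first :: rest) = (FB (first :: rest) (first :: rest).length).1 := rfl
    rw [hA, hB, h1]
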